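-- pv_equiv track=rewrite | github.com/edaaydinea/HackerRank | Algorithms/03 - Strings/Build a Palindrome.py | build_palindrome_lookup
-- ===== SOURCE A (Python) =====
-- def build_palindrome_lookup(s):
--     sx = '|' + '|'.join(s) + '|'
--     sxlen = len(sx)
--     rslt = [0] * sxlen
--     c, r, m, n = 0, 0, 0, 0
--     for i in range(1, sxlen):
--         if i > r:
--             rslt[i] = 0
--             m = i - 1
--             n = i + 1
--         else:
--             i2 = c * 2 - i
--             if rslt[i2] < r - i:
--                 rslt[i] = rslt[i2]
--                 m = -1
--             else:
--                 rslt[i] = r - i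
--                 n = r + 1
--                 m = i * 2 - n
--         while m >= 0 and n < sxlen and sx[m] == sx[n]:
--             rslt[i] += 1
--             m -= 1
--             n += 1
--         if i + rslt[i] > r:
--             r = i + rslt[i]
--             c = i
--     res = [0] * len(s)
--     for i in range(1, sxlen - 1):
--         idx = (i - rslt[i]) // 2
--         res[idx] = max(res[idx], rslt[i])
--     return res
-- ===== SOURCE B (Python) =====
-- def build_palindrome_lookup(s):
--     # B: naive expand-around-center on the '|'-augmented string (no Manacher
--     # mirror/right-boundary state), fused with the aggregation pass.
--     sx = '|' + '|'.join(s) + '|'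
--     n = len(sx)
--     res = [0] * len(s)
--     for i in range(1, n - 1):
--         k = 0
--         while k + 1 <= i and i + k + 1 < n and sx[i - k - 1] == sx[i + k + 1]:
--             k += 1
--         idx = (i - k) // 2
--         if k > res[idx]:
--             res[idx] = k
--     return res
-- ===== Notes on version B (the rewrite author's own statement) =====
-- stated objective: simpler
-- what changed: Replaced Manacher's linear scan (mirror-index reuse plus center/right-boundary state c,r,m,n) with a plain expand-around-center loop over the same bar-augmented string, fused with the aggregation pass into one loop.
import Mathlib
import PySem

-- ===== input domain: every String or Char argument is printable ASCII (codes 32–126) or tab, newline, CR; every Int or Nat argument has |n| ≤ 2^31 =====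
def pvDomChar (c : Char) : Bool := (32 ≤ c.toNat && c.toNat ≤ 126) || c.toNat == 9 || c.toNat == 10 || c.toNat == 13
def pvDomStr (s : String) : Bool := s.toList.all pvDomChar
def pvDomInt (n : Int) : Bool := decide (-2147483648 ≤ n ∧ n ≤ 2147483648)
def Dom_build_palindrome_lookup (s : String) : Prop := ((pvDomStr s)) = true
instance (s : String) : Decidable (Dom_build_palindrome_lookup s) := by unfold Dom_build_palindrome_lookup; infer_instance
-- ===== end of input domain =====

-- B replaces Manacher's mirrored-radius linear scan with a plain expand-around-center
-- pass on the same bar-augmented string, fused with the aggregation loop (simpler; not faster).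

-- ===== PORT A =====
-- sx = '|' + '|'.join(s) + '|'   (identical first line of both programs)
def pvSx (s : String) : List Char :=
  ['|'] ++ PySem.Chars.join ['|'] (s.toList.map (fun c => [c])) ++ ['|']

-- while m >= 0 and n < sxlen and sx[m] == sx[n]: rslt[i] += 1; m -= 1; n += 1
-- (the cell rslt[i] is carried as the accumulator v and written back once after the loop)
def pvAWhile (sx : List Char) (sxlen m n v : Int) : Int × Int × Int :=
  if h : 0 ≤ m ∧ n < sxlen ∧ PySem.List.pyGet? sx m = PySem.List.pyGet? sx n then
    pvAWhile sx sxlen (m - 1) (n + 1) (v + 1)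
  else (m, n, v)
termination_by (sxlen - n).toNat
decreasing_by obtain ⟨h1, h2, h3⟩ := h; omega

-- for i in range(1, sxlen): …  with loop state (rslt, c, r, m, n)
def pvALoop (sx : List Char) (sxlen : Int) (rslt : List Int) (c r m n i : Int) :
    List Int × Int × Int × Int × Int :=
  if hi : i < sxlen then
    let bres : List Int × Int × Int :=
      if i > r then
        (PySem.List.pySetD rslt i 0, i - 1, i + 1)
      else
        let i2 := c * 2 - i
        if PySem.List.pyGetD rslt i2 0 < r - i then
          (PySem.List.pySetD rslt i (PySem.List.pyGetD rslt i2 0), -1, n)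
        else
          (PySem.List.pySetD rslt i (r - i), i * 2 - (r + 1), r + 1)
    let w := pvAWhile sx sxlen bres.2.1 bres.2.2 (PySem.List.pyGetD bres.1 i 0)
    let rslt2 := PySem.List.pySetD bres.1 i w.2.2
    let cr : Int × Int := if i + w.2.2 > r then (i, i + w.2.2) else (c, r)
    pvALoop sx sxlen rslt2 cr.1 cr.2 w.1 w.2.1 (i + 1)
  else (rslt, c, r, m, n)
termination_by (sxlen - i).toNat
decreasing_by omega

-- for i in range(1, sxlen - 1): idx = (i - rslt[i]) // 2; res[idx] = max(res[idx], rslt[i])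
def pvAResLoop (rslt : List Int) (sxlen : Int) (res : List Int) (i : Int) : List Int :=
  if hi : i < sxlen - 1 then
    pvAResLoop rslt sxlen
      (PySem.List.pySetD res (PySem.Int.floordiv (i - PySem.List.pyGetD rslt i 0) 2)
        (max (PySem.List.pyGetD res (PySem.Int.floordiv (i - PySem.List.pyGetD rslt i 0) 2) 0)
          (PySem.List.pyGetD rslt i 0)))
      (i + 1)
  else res
termination_by (sxlen - 1 - i).toNat
decreasing_by omega

def build_palindrome_lookup (s : String) : List Int :=
  let sx := pvSx s
  let sxlen : Int := (sx.length : Int)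
  let st := pvALoop sx sxlen (PySem.List.pyRepeat [(0 : Int)] sxlen) 0 0 0 0 1
  pvAResLoop st.1 sxlen (PySem.List.pyRepeat [(0 : Int)] (PySem.Str.len s)) 1

-- ===== PORT B =====
-- while k + 1 <= i and i + k + 1 < n and sx[i-k-1] == sx[i+k+1]: k += 1
def pvBWhile (sx : List Char) (n i k : Int) : Int :=
  if h : k + 1 ≤ i ∧ i + k + 1 < n ∧
      PySem.List.pyGet? sx (i - k - 1) = PySem.List.pyGet? sx (i + k + 1) then
    pvBWhile sx n i (k + 1)
  else k
termination_by (n - (i + k)).toNat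
decreasing_by obtain ⟨h1, h2, h3⟩ := h; omega

-- for i in range(1, n - 1): k = expand; idx = (i - k) // 2; if k > res[idx]: res[idx] = k
def pvBLoop (sx : List Char) (n : Int) (res : List Int) (i : Int) : List Int :=
  if hi : i < n - 1 then
    let k := pvBWhile sx n i 0
    let idx := PySem.Int.floordiv (i - k) 2
    pvBLoop sx n
      (if k > PySem.List.pyGetD res idx 0 then PySem.List.pySetD res idx k else res) (i + 1)
  else res
termination_by (n - 1 - i).toNat
decreasing_by omega

def build_palindrome_lookup_alt (s : String) : List Int :=
  let sx := pvSx s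
  pvBLoop sx (sx.length : Int) (PySem.List.pyRepeat [(0 : Int)] (PySem.Str.len s)) 1

-- ===== PRECONDITION & SPEC =====
def Spec_build_palindrome_lookup (s : String) (out : List Int) : Prop := out = build_palindrome_lookup_alt s
instance (s : String) (out : List Int) : Decidable (Spec_build_palindrome_lookup s out) := by unfold Spec_build_palindrome_lookup; infer_instance

-- ===== CLAIM (what is proved, stated in full; the proofs are below) =====
def Claim_equal_build_palindrome_lookup : Prop := ∀ (s : String), Dom_build_palindrome_lookup s → Spec_build_palindrome_lookup s (build_palindrome_lookup s)

-- ===== LEMMAS AND PROOFS =====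

-- `pvGood l i k`: the window [i-k, i+k] lies inside l and is palindromic around i.
abbrev pvGood (l : List Char) (i k : Nat) : Prop :=
  k ≤ i ∧ i + k < l.length ∧ ∀ j : Nat, j ≤ k → l.getD (i - j) '|' = l.getD (i + j) '|'

-- the palindrome radius at center i (greatest such k)
def pvRad (l : List Char) (i : Nat) : Nat := Nat.findGreatest (fun k => pvGood l i k) i

lemma pvGood_zero (l : List Char) (i : Nat) (h : i < l.length) : pvGood l i 0 :=
  ⟨Nat.zero_le i, by omega, fun j hj => by
    have : j = 0 := by omega
    subst this; rfl⟩

lemma pvGood_mono (l : List Char) {i k j : Nat} (h : pvGood l i k) (hj : j ≤ k) :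
    pvGood l i j := ⟨by omega, by omega, fun t ht => h.2.2 t (by omega)⟩

lemma pvRad_le (l : List Char) (i : Nat) : pvRad l i ≤ i := Nat.findGreatest_le i

lemma pvRad_good (l : List Char) {i : Nat} (h : i < l.length) : pvGood l i (pvRad l i) :=
  Nat.findGreatest_spec (Nat.zero_le i) (pvGood_zero l i h)

lemma pvRad_not_succ (l : List Char) (i : Nat) : ¬ pvGood l i (pvRad l i + 1) := by
  by_cases h1 : pvRad l i + 1 ≤ i
  · exact Nat.findGreatest_is_greatest (Nat.lt_succ_self _) h1
  · intro hg; exact absurd hg.1 (by omega)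

lemma pvRad_eq (l : List Char) {i k : Nat} (hg : pvGood l i k) (hn : ¬ pvGood l i (k + 1)) :
    pvRad l i = k := by
  have hk : k ≤ pvRad l i := Nat.le_findGreatest hg.1 hg
  rcases Nat.lt_or_ge k (pvRad l i) with h | h
  · exact absurd (pvGood_mono l (pvRad_good l (by omega)) h) hn
  · omega

lemma pvGet_eq_iff (l : List Char) (a b : Nat) (ha : a < l.length) (hb : b < l.length) :
    (PySem.List.pyGet? l (a : Int) = PySem.List.pyGet? l (b : Int)) ↔
      l.getD a '|' = l.getD b '|' := by
  rw [List.getD_eq_getElem l '|' ha, List.getD_eq_getElem l '|' hb]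
  simp [PySem.List.pyGet?_natCast, List.getElem?_eq_getElem ha, List.getElem?_eq_getElem hb]

lemma pvGood_succ_iff (l : List Char) {i k : Nat} (hg : pvGood l i k) :
    pvGood l i (k + 1) ↔
      (k + 1 ≤ i ∧ i + (k + 1) < l.length ∧ l.getD (i - (k + 1)) '|' = l.getD (i + (k + 1)) '|') := by
  constructor
  · exact fun h => ⟨h.1, h.2.1, h.2.2 _ le_rfl⟩
  · rintro ⟨h1, h2, h3⟩
    refine ⟨h1, h2, fun j hj => ?_⟩
    rcases Nat.lt_or_ge j (k + 1) with h | h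
    · exact hg.2.2 j (by omega)
    · have : j = k + 1 := by omega
      subst this; exact h3

-- the Python loop guard, as both ports phrase it, says exactly "extendable to radius k+1"
lemma pvCondB_iff (l : List Char) (i k : Nat) (hg : pvGood l i k) :
    ((k : Int) + 1 ≤ (i : Int) ∧ (i : Int) + (k : Int) + 1 < (l.length : Int) ∧
      PySem.List.pyGet? l ((i : Int) - (k : Int) - 1) = PySem.List.pyGet? l ((i : Int) + (k : Int) + 1))
    ↔ pvGood l i (k + 1) := by
  rw [pvGood_succ_iff l hg]
  constructor
  · rintro ⟨h1, h2, h3⟩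
    have e1 : ((i : Int) - (k : Int) - 1) = ((i - (k + 1) : Nat) : Int) := by omega
    have e2 : ((i : Int) + (k : Int) + 1) = ((i + (k + 1) : Nat) : Int) := by omega
    rw [e1, e2] at h3
    exact ⟨by omega, by omega, (pvGet_eq_iff l _ _ (by omega) (by omega)).mp h3⟩
  · rintro ⟨h1, h2, h3⟩
    have e1 : ((i : Int) - (k : Int) - 1) = ((i - (k + 1) : Nat) : Int) := by omega
    have e2 : ((i : Int) + (k : Int) + 1) = ((i + (k + 1) : Nat) : Int) := by omega
    rw [e1, e2]
    exact ⟨by omega, by omega, (pvGet_eq_iff l _ _ (by omega) (by omega)).mpr h3⟩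

theorem pvBWhile_eq (l : List Char) (i k : Nat) (hg : pvGood l i k) :
    pvBWhile l (l.length : Int) i k = (pvRad l i : Int) := by
  have hik : i + k < l.length := hg.2.1
  rw [pvBWhile]
  by_cases h : pvGood l i (k + 1)
  · rw [dif_pos ((pvCondB_iff l i k hg).mpr h)]
    have h2 := pvBWhile_eq l i (k + 1) h
    push_cast at h2
    exact h2
  · rw [dif_neg (fun hc => h ((pvCondB_iff l i k hg).mp hc))]
    rw [pvRad_eq l hg h]
termination_by l.length - (i + k)
decreasing_by have := h.2.1; omega

theorem pvAWhile_eq (l : List Char) (i t : Nat) (hg : pvGood l i t) :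
    (pvAWhile l (l.length : Int) ((i : Int) - t - 1) ((i : Int) + t + 1) t).2.2 = (pvRad l i : Int) := by
  have hik : i + t < l.length := hg.2.1
  rw [pvAWhile]
  by_cases h : pvGood l i (t + 1)
  · have hcond : (0 : Int) ≤ (i : Int) - t - 1 ∧ (i : Int) + t + 1 < (l.length : Int) ∧
        PySem.List.pyGet? l ((i : Int) - t - 1) = PySem.List.pyGet? l ((i : Int) + t + 1) := by
      obtain ⟨h1, h2, h3⟩ := (pvCondB_iff l i t hg).mpr h
      exact ⟨by omega, h2, h3⟩
    rw [dif_pos hcond]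
    have h2 := pvAWhile_eq l i (t + 1) h
    push_cast at h2
    have e1 : (i : Int) - t - 1 - 1 = (i : Int) - ((t : Int) + 1) - 1 := by ring
    have e2 : (i : Int) + t + 1 + 1 = (i : Int) + ((t : Int) + 1) + 1 := by ring
    rw [e1, e2]
    exact h2
  · have hcond : ¬ ((0 : Int) ≤ (i : Int) - t - 1 ∧ (i : Int) + t + 1 < (l.length : Int) ∧
        PySem.List.pyGet? l ((i : Int) - t - 1) = PySem.List.pyGet? l ((i : Int) + t + 1)) := by
      intro hc
      exact h ((pvCondB_iff l i t hg).mp ⟨by omega, hc.2.1, hc.2.2⟩)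
    rw [dif_neg hcond]
    rw [pvRad_eq l hg h]
termination_by l.length - (i + t)
decreasing_by have := h.2.1; omega

-- mirror transfer of a single match across a palindromic window around c
lemma pvMirror (l : List Char) {c R d j : Nat} (hc : pvGood l c R) (hd : d ≤ R)
    (hj : j ≤ R - d) :
    (l.getD (c + d - j) '|' = l.getD (c + d + j) '|') ↔
      (l.getD (c - d - j) '|' = l.getD (c - d + j) '|') := by
  have hRc : R ≤ c := hc.1
  have hsym := hc.2.2
  have ha : l.getD (c + d + j) '|' = l.getD (c - d - j) '|' := by
    rw [show c + d + j = c + (d + j) by ring, show c - d - j = c - (d + j) by omega]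
    exact (hsym (d + j) (by omega)).symm
  have hb : l.getD (c + d - j) '|' = l.getD (c - d + j) '|' := by
    rcases Nat.le_total j d with h | h
    · rw [show c + d - j = c + (d - j) by omega, show c - d + j = c - (d - j) by omega]
      exact (hsym (d - j) (by omega)).symm
    · rw [show c + d - j = c - (j - d) by omega, show c - d + j = c + (j - d) by omega]
      exact hsym (j - d) (by omega)
  rw [ha, hb]
  exact eq_comm

lemma pvMirror_lt (l : List Char) {c R d : Nat} (hc : pvGood l c R) (hd1 : 1 ≤ d) (hd : d ≤ R)
    (h : pvRad l (c - d) < R - d) : pvRad l (c + d) = pvRad l (c - d) := by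
  have hRc : R ≤ c := hc.1
  have hlen : c + R < l.length := hc.2.1
  have hcd : c - d < l.length := by omega
  have hrho : pvGood l (c - d) (pvRad l (c - d)) := pvRad_good l hcd
  have hrhocd : pvRad l (c - d) ≤ c - d := pvRad_le l (c - d)
  have hrholt : pvRad l (c - d) < c - d := by omega
  apply pvRad_eq
  · refine ⟨by omega, by omega, fun j hj => ?_⟩
    exact (pvMirror l hc hd (by omega)).mpr (hrho.2.2 j hj)
  · intro hgb
    have hmatch := hgb.2.2 (pvRad l (c - d) + 1) le_rfl
    have hm2 := (pvMirror l hc hd (show pvRad l (c - d) + 1 ≤ R - d by omega)).mp hmatch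
    exact pvRad_not_succ l (c - d)
      ((pvGood_succ_iff l hrho).mpr ⟨by omega, by omega, hm2⟩)

lemma pvMirror_ge (l : List Char) {c R d : Nat} (hc : pvGood l c R) (hd1 : 1 ≤ d) (hd : d ≤ R)
    (h : R - d ≤ pvRad l (c - d)) : pvGood l (c + d) (R - d) := by
  have hRc : R ≤ c := hc.1
  have hlen : c + R < l.length := hc.2.1
  have hg2 : pvGood l (c - d) (R - d) :=
    pvGood_mono l (pvRad_good l (show c - d < l.length by omega)) h
  refine ⟨by omega, by omega, fun j hj => ?_⟩
  exact (pvMirror l hc hd (by omega)).mpr (hg2.2.2 j hj)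

lemma pvGetD_set (xs : List Int) (iN jN : Nat) (v : Int) (hi : iN < xs.length) :
    (xs.set iN v).getD jN 0 = if jN = iN then v else xs.getD jN 0 := by
  have := PySem.List.pyGetD_pySetD_natCast xs iN jN v 0 hi
  simpa [PySem.List.pySetD_natCast, PySem.List.pyGetD_natCast] using this

-- invariant of Manacher's scan: processed entries hold the true radius,
-- and (c, r) name a center with window end r = c + rad c, c before i
theorem pvALoop_spec (l : List Char) (i : Nat) (hi1 : 1 ≤ i) (rslt : List Int)
    (hlen : rslt.length = l.length) (c r m n : Int) (cN : Nat) (hc : c = (cN : Int))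
    (hci : cN < i) (hrr : r = ((cN + pvRad l cN : Nat) : Int))
    (hr : ∀ j : Nat, j < i → rslt.getD j 0 = (pvRad l j : Int)) :
    ∀ j : Nat, j < l.length →
      (pvALoop l (l.length : Int) rslt c r m n (i : Int)).1.getD j 0 = (pvRad l j : Int) := by
  subst hc; subst hrr
  intro j hj
  rw [pvALoop]
  by_cases hip : (i : Int) < (l.length : Int)
  · rw [dif_pos hip]
    have hilen : i < l.length := by omega
    have hrl : rslt.length = l.length := hlen
    have tail : ∀ (rslt2 : List Int) (m' n' : Int),
        rslt2.length = l.length →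
        (∀ j2 : Nat, j2 < i + 1 → rslt2.getD j2 0 = (pvRad l j2 : Int)) →
        ((pvALoop l (l.length : Int) rslt2
            (if (i : Int) + (pvRad l i : Int) > ((cN + pvRad l cN : Nat) : Int) then
              ((i : Int), (i : Int) + (pvRad l i : Int)) else ((cN : Int), ((cN + pvRad l cN : Nat) : Int))).1
            (if (i : Int) + (pvRad l i : Int) > ((cN + pvRad l cN : Nat) : Int) then
              ((i : Int), (i : Int) + (pvRad l i : Int)) else ((cN : Int), ((cN + pvRad l cN : Nat) : Int))).2
            m' n' ((i : Int) + 1)).1.getD j 0 = (pvRad l j : Int)) := by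
      intro rslt2 m' n' hlen2 hr2
      have e1 : (i : Int) + 1 = ((i + 1 : Nat) : Int) := by push_cast; ring
      by_cases hup : (i : Int) + (pvRad l i : Int) > ((cN + pvRad l cN : Nat) : Int)
      · rw [if_pos hup, e1]
        exact pvALoop_spec l (i + 1) (by omega) rslt2 hlen2 _ _ m' n' i rfl (by omega)
          (by push_cast; ring) hr2 j hj
      · rw [if_neg hup, e1]
        exact pvALoop_spec l (i + 1) (by omega) rslt2 hlen2 _ _ m' n' cN rfl (by omega)
          rfl hr2 j hj
    by_cases hbr : (i : Int) > ((cN + pvRad l cN : Nat) : Int)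
    · -- new center beyond r: plain expansion from radius 0
      rw [if_pos hbr]
      have hv0 : PySem.List.pyGetD (PySem.List.pySetD rslt (i : Int) 0) (i : Int) 0 = 0 := by
        rw [PySem.List.pyGetD_pySetD_natCast rslt i i 0 0 (by omega)]; simp
      have hW := pvAWhile_eq l i 0 (pvGood_zero l i hilen)
      push_cast at hW
      rw [sub_zero, add_zero] at hW
      dsimp only
      rw [hv0, hW]
      apply tail _ _ _ (by simp [hlen])
      intro j2 hj2
      rw [PySem.List.pySetD_natCast, PySem.List.pySetD_natCast,
        pvGetD_set _ i j2 _ (by simp [hrl]; omega), pvGetD_set _ i j2 _ (by omega)]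
      by_cases hji : j2 = i
      · subst hji; simp
      · rw [if_neg hji, if_neg hji]; exact hr j2 (by omega)
    · rw [if_neg hbr]
      have hRc := pvRad_le l cN
      have hd1 : 1 ≤ i - cN := by omega
      have hdR : i - cN ≤ pvRad l cN := by omega
      have hcN : cN < l.length := by omega
      have e_i2 : ((cN : Int) * 2 - (i : Int)) = ((cN - (i - cN) : Nat) : Int) := by omega
      have hval : PySem.List.pyGetD rslt ((cN : Int) * 2 - (i : Int)) 0
          = ((pvRad l (cN - (i - cN)) : Nat) : Int) := by
        rw [e_i2, PySem.List.pyGetD_natCast]; exact hr _ (by omega)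
      dsimp only
      rw [hval]
      by_cases h2a : pvRad l (cN - (i - cN)) < pvRad l cN - (i - cN)
      · -- mirror value strictly inside the window: copied, loop entered with m = -1
        rw [if_pos (show ((pvRad l (cN - (i - cN)) : Nat) : Int) < ((cN + pvRad l cN : Nat) : Int) - (i : Int) by omega)]
        have hradi : pvRad l i = pvRad l (cN - (i - cN)) := by
          have := pvMirror_lt l (pvRad_good l hcN) hd1 hdR h2a
          rwa [show cN + (i - cN) = i by omega] at this
        have hv0 : PySem.List.pyGetD (PySem.List.pySetD rslt (i : Int) ((pvRad l (cN - (i - cN)) : Nat) : Int)) (i : Int) 0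
            = ((pvRad l (cN - (i - cN)) : Nat) : Int) := by
          rw [PySem.List.pyGetD_pySetD_natCast rslt i i _ 0 (by omega)]; simp
        have hwhile : pvAWhile l (l.length : Int) (-1) n ((pvRad l (cN - (i - cN)) : Nat) : Int)
            = (-1, n, ((pvRad l (cN - (i - cN)) : Nat) : Int)) := by
          rw [pvAWhile, dif_neg]; rintro ⟨h1, -, -⟩; norm_num at h1
        dsimp only
        rw [hv0, hwhile]
        dsimp only
        rw [show ((pvRad l (cN - (i - cN)) : Nat) : Int) = ((pvRad l i : Nat) : Int) from by rw [hradi]]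
        apply tail _ _ _ (by simp [hlen])
        intro j2 hj2
        rw [PySem.List.pySetD_natCast, PySem.List.pySetD_natCast,
          pvGetD_set _ i j2 _ (by simp [hrl]; omega), pvGetD_set _ i j2 _ (by omega)]
        by_cases hji : j2 = i
        · subst hji; simp
        · rw [if_neg hji, if_neg hji]; exact hr j2 (by omega)
      · -- mirror value reaches the window edge: seed with r - i and expand
        rw [if_neg (show ¬ (((pvRad l (cN - (i - cN)) : Nat) : Int) < ((cN + pvRad l cN : Nat) : Int) - (i : Int)) by omega)]
        have hgood : pvGood l i (pvRad l cN - (i - cN)) := by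
          have := pvMirror_ge l (pvRad_good l hcN) hd1 hdR (by omega)
          rwa [show cN + (i - cN) = i by omega] at this
        have e_v : (((cN + pvRad l cN : Nat) : Int) - (i : Int)) = ((pvRad l cN - (i - cN) : Nat) : Int) := by omega
        have e_m : ((i : Int) * 2 - (((cN + pvRad l cN : Nat) : Int) + 1))
            = ((i : Int) - ((pvRad l cN - (i - cN) : Nat) : Int) - 1) := by omega
        have e_n : (((cN + pvRad l cN : Nat) : Int) + 1)
            = ((i : Int) + ((pvRad l cN - (i - cN) : Nat) : Int) + 1) := by omega
        have hv0 : PySem.List.pyGetD (PySem.List.pySetD rslt (i : Int) ((pvRad l cN - (i - cN) : Nat) : Int)) (i : Int) 0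
            = ((pvRad l cN - (i - cN) : Nat) : Int) := by
          rw [PySem.List.pyGetD_pySetD_natCast rslt i i _ 0 (by omega)]; simp
        have hW := pvAWhile_eq l i (pvRad l cN - (i - cN)) hgood
        dsimp only
        rw [e_m, e_n, e_v, hv0, hW]
        apply tail _ _ _ (by simp [hlen])
        intro j2 hj2
        rw [PySem.List.pySetD_natCast, PySem.List.pySetD_natCast,
          pvGetD_set _ i j2 _ (by simp [hrl]; omega), pvGetD_set _ i j2 _ (by omega)]
        by_cases hji : j2 = i
        · subst hji; simp
        · rw [if_neg hji, if_neg hji]; exact hr j2 (by omega)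
  · rw [dif_neg hip]
    exact hr j (by omega)
termination_by l.length - i
decreasing_by all_goals omega

-- the two result passes agree once the per-center value is the radius in both
theorem pvResLoops_eq (l : List Char) (rslt : List Int) (res : List Int) (i : Nat) (hi1 : 1 ≤ i)
    (hr : ∀ j : Nat, j < l.length → rslt.getD j 0 = (pvRad l j : Int))
    (hres : 2 * res.length + 1 = l.length) :
    pvAResLoop rslt (l.length : Int) res (i : Int) = pvBLoop l (l.length : Int) res (i : Int) := by
  rw [pvAResLoop, pvBLoop]
  by_cases hi : (i : Int) < (l.length : Int) - 1
  · rw [dif_pos hi, dif_pos hi]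
    have hilen : i < l.length := by omega
    have hL : 1 ≤ res.length := by omega
    have hk0 : pvBWhile l (l.length : Int) (i : Int) 0 = (pvRad l i : Int) := by
      have := pvBWhile_eq l i 0 (pvGood_zero l i hilen)
      push_cast at this
      exact this
    have hval : PySem.List.pyGetD rslt (i : Int) 0 = (pvRad l i : Int) := by
      rw [PySem.List.pyGetD_natCast]; exact hr i hilen
    have hradle := pvRad_le l i
    have e_sub : (i : Int) - (pvRad l i : Int) = ((i - pvRad l i : Nat) : Int) := by omega
    have e_div : PySem.Int.floordiv ((i - pvRad l i : Nat) : Int) 2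
        = (((i - pvRad l i) / 2 : Nat) : Int) := by
      exact_mod_cast PySem.Int.floordiv_natCast (i - pvRad l i) 2
    have hidx : (i - pvRad l i) / 2 < res.length := by omega
    have hresval : PySem.List.pyGetD res ((((i - pvRad l i) / 2 : Nat)) : Int) 0
        = res.getD ((i - pvRad l i) / 2) 0 := PySem.List.pyGetD_natCast _ _ _
    dsimp only
    rw [hk0, hval, e_sub, e_div, hresval]
    have e1 : (i : Int) + 1 = ((i + 1 : Nat) : Int) := by push_cast; ring
    by_cases hcmp : res.getD ((i - pvRad l i) / 2) 0 < (pvRad l i : Int)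
    · rw [if_pos hcmp, max_eq_right (le_of_lt hcmp), e1]
      exact pvResLoops_eq l rslt _ (i + 1) (by omega) hr
        (by rw [PySem.List.pySetD_natCast, List.length_set]; exact hres)
    · rw [if_neg hcmp, max_eq_left (le_of_not_gt hcmp), PySem.List.pySetD_natCast]
      rw [List.getD_eq_getElem res 0 hidx, List.set_getElem_self, e1]
      exact pvResLoops_eq l rslt res (i + 1) (by omega) hr hres
  · rw [dif_neg hi, dif_neg hi]
termination_by l.length - i
decreasing_by all_goals omega

lemma pvJoin_eq (c : Char) (cs : List Char) :
    PySem.Chars.join ['|'] ((c :: cs).map (fun c => [c])) ++ ['|']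
      = (c :: cs).flatMap (fun c => [c, '|']) := by
  induction cs generalizing c with
  | nil => simp [PySem.Chars.join_singleton]
  | cons c' rest ih =>
    have h := ih c'
    rw [List.map_cons] at h ⊢
    rw [List.map_cons, PySem.Chars.join_cons_cons]
    simp only [List.flatMap_cons] at h ⊢
    simp only [List.append_assoc] at h ⊢
    rw [h]
    simp

lemma pvFlat_len (t : List Char) : (t.flatMap (fun c => [c, '|'])).length = 2 * t.length := by
  induction t with
  | nil => simp
  | cons a r ih => simp only [List.flatMap_cons, List.length_append, ih]; simp; omega

lemma pvSx_cons (s : String) (c : Char) (cs : List Char) (h : s.toList = c :: cs) :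
    pvSx s = '|' :: (c :: cs).flatMap (fun c => [c, '|']) := by
  unfold pvSx
  rw [h, ← pvJoin_eq]
  simp

lemma pvSx_len (s : String) (c : Char) (cs : List Char) (h : s.toList = c :: cs) :
    (pvSx s).length = 2 * s.toList.length + 1 := by
  rw [pvSx_cons s c cs h, h]
  simp only [List.length_cons, pvFlat_len]

-- ===== VERDICT (by name: the statement is the Claim_ definition above) =====
theorem build_palindrome_lookup_spec : Claim_equal_build_palindrome_lookup := by
  unfold Claim_equal_build_palindrome_lookup Spec_build_palindrome_lookup
  intro s _
  unfold build_palindrome_lookup build_palindrome_lookup_alt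
  dsimp only
  rcases hcs : s.toList with _ | ⟨c, cs⟩
  · -- empty string: sx = "||", both passes return [] at once
    have hsx : pvSx s = ['|', '|'] := by
      unfold pvSx; rw [hcs]; simp [PySem.Chars.join_nil]
    have hlen0 : PySem.Str.len s = 0 := by rw [PySem.Str.len_eq, hcs]; rfl
    rw [hsx, hlen0]
    rw [pvAResLoop, pvBLoop]
    norm_num
  · have hlen2 : (pvSx s).length = 2 * s.toList.length + 1 := pvSx_len s c cs hcs
    have hL1 : 1 ≤ s.toList.length := by rw [hcs]; simp
    have hlen3 : 3 ≤ (pvSx s).length := by omega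
    have hone : (1 : Int) = ((1 : Nat) : Int) := by norm_num
    have hArslt : ∀ j : Nat, j < (pvSx s).length →
        (pvALoop (pvSx s) ((pvSx s).length : Int)
          (PySem.List.pyRepeat [(0 : Int)] ((pvSx s).length : Int)) 0 0 0 0 1).1.getD j 0
          = (pvRad (pvSx s) j : Int) := by
      rw [hone]
      apply pvALoop_spec (pvSx s) 1 le_rfl _ (by simp [PySem.List.pyRepeat_singleton]) _ _ 0 0 0
        (by simp) (by omega) (by simp [pvRad, Nat.findGreatest_zero])
      intro j hj
      have hj0 : j = 0 := by omega
      subst hj0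
      rw [PySem.List.pyRepeat_singleton]
      rw [List.getD_replicate 0 (by simp; omega)]
      simp [pvRad, Nat.findGreatest_zero]
    have hresrep : PySem.List.pyRepeat [(0 : Int)] (PySem.Str.len s)
        = List.replicate s.toList.length (0 : Int) := by
      rw [PySem.List.pyRepeat_singleton, PySem.Str.len_eq]
      simp
    rw [hresrep, hone]
    exact pvResLoops_eq (pvSx s) _ _ 1 le_rfl hArslt (by simp [hlen2])
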